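-- pv_equiv track=rewrite | github.com/Wulfic/Cicada3301 | Tools/analyze_p20_nonprime_stream.py | find_english_words
-- ===== SOURCE A (Python) =====
-- ENGLISH_WORDS = set([
--     'THE', 'BE', 'TO', 'OF', 'AND', 'A', 'IN', 'THAT', 'HAVE', 'I', 'IT', 'FOR', 'NOT',
--     'ON', 'WITH', 'HE', 'AS', 'YOU', 'DO', 'AT', 'THIS', 'BUT', 'HIS', 'BY', 'FROM',
--     'THEY', 'WE', 'SAY', 'HER', 'SHE', 'OR', 'AN', 'WILL', 'MY', 'ONE', 'ALL', 'WOULD',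
--     'THERE', 'THEIR', 'WHAT', 'SO', 'UP', 'OUT', 'IF', 'ABOUT', 'WHO', 'GET', 'WHICH',
--     'GO', 'ME', 'WHEN', 'MAKE', 'CAN', 'LIKE', 'TIME', 'NO', 'JUST', 'HIM', 'KNOW',
--     'TAKE', 'PEOPLE', 'INTO', 'YEAR', 'YOUR', 'GOOD', 'SOME', 'COULD', 'THEM', 'SEE',
--     'OTHER', 'THAN', 'THEN', 'NOW', 'LOOK', 'ONLY', 'COME', 'ITS', 'OVER', 'THINK',
--     'ALSO', 'BACK', 'AFTER', 'USE', 'TWO', 'HOW', 'OUR', 'WORK', 'FIRST', 'WELL',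
--     'WAY', 'EVEN', 'NEW', 'WANT', 'BECAUSE', 'ANY', 'THESE', 'GIVE', 'DAY', 'MOST',
--     'US', 'IS', 'AM', 'ARE', 'WAS', 'WERE', 'BEEN', 'BEING', 'EACH', 'FEW', 'THOSE',
--     'MUST', 'SELF', 'OWN', 'SAME', 'TELL', 'NEED', 'FEEL', 'HIGH', 'OLD', 'GREAT',
--     'NAME', 'THING', 'MAN', 'WORLD', 'LIFE', 'HAND', 'PART', 'CHILD', 'EYE', 'WOMAN',
--     'PLACE', 'CASE', 'WEEK', 'POINT', 'WORD', 'FIND', 'LONG', 'LITTLE', 'STILL',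
--     'MIGHT', 'FACE', 'LAST', 'SIDE', 'DOOR', 'HOME', 'NIGHT', 'REAL', 'HEAD', 'TEAM',
--     'BEST', 'HOUR', 'LINE', 'LEFT', 'ALONE', 'LONE', 'PATH', 'TRUTH', 'LIGHT', 'DARK',
--     'SOUL', 'MIND', 'BODY', 'HEART', 'DEATH', 'DEAD', 'LIVE', 'LEARN', 'TEACH', 'SHOW',
--     'WALK', 'RUN', 'STAND', 'SIT', 'FALL', 'RISE', 'TURN', 'MOVE', 'WATCH', 'WAIT',
--     'SPEAK', 'HEAR', 'READ', 'WRITE', 'CALL', 'LEAD', 'HOLD', 'KEEP', 'BEGIN', 'START',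
--     # Old English
--     'EODE', 'SEFA', 'DEOR', 'WEAN', 'EORL', 'WYRD', 'FRITH',
--     # Cicada words
--     'DIVINITY', 'PRIMES', 'SACRED', 'TOTIENT', 'PILGRIM', 'KOAN', 'WISDOM',
-- ])
--
-- def find_english_words(text):
--     """Find all English words in the text."""
--     found = []
--     for word in ENGLISH_WORDS:
--         if len(word) >= 3:
--             idx = 0
--             while True:
--                 idx = text.find(word, idx)
--                 if idx == -1:
--                     break
--                 found.append((idx, word))
--                 idx += 1
--     return sorted(found)
-- ===== SOURCE B (Python) =====
-- WORD_LINES = [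
--     "THE BE TO OF AND A IN THAT HAVE I IT FOR NOT ON WITH HE AS YOU DO AT",
--     "THIS BUT HIS BY FROM THEY WE SAY HER SHE OR AN WILL MY ONE ALL WOULD THERE THEIR WHAT",
--     "SO UP OUT IF ABOUT WHO GET WHICH GO ME WHEN MAKE CAN LIKE TIME NO JUST HIM KNOW TAKE",
--     "PEOPLE INTO YEAR YOUR GOOD SOME COULD THEM SEE OTHER THAN THEN NOW LOOK ONLY COME ITS OVER THINK ALSO",
--     "BACK AFTER USE TWO HOW OUR WORK FIRST WELL WAY EVEN NEW WANT BECAUSE ANY THESE GIVE DAY MOST US",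
--     "IS AM ARE WAS WERE BEEN BEING EACH FEW THOSE MUST SELF OWN SAME TELL NEED FEEL HIGH OLD GREAT",
--     "NAME THING MAN WORLD LIFE HAND PART CHILD EYE WOMAN PLACE CASE WEEK POINT WORD FIND LONG LITTLE STILL MIGHT",
--     "FACE LAST SIDE DOOR HOME NIGHT REAL HEAD TEAM BEST HOUR LINE LEFT ALONE LONE PATH TRUTH LIGHT DARK SOUL",
--     "MIND BODY HEART DEATH DEAD LIVE LEARN TEACH SHOW WALK RUN STAND SIT FALL RISE TURN MOVE WATCH WAIT SPEAK",
--     "HEAR READ WRITE CALL LEAD HOLD KEEP BEGIN START EODE SEFA DEOR WEAN EORL WYRD FRITH DIVINITY PRIMES SACRED TOTIENT",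
--     "PILGRIM KOAN WISDOM",
-- ]
--
-- ENGLISH_WORDS = set(w for line in WORD_LINES for w in line.split())
--
-- LENGTHS = sorted({len(w) for w in ENGLISH_WORDS if len(w) >= 3})
--
-- def find_english_words(text):
--     """Find all English words in the text: one position-major pass, probing only
--     the distinct dictionary word lengths with a set membership test per slice."""
--     return sorted((i, text[i:i+L])
--                   for i in range(len(text))
--                   for L in LENGTHS
--                   if len(text[i:i+L]) == L and text[i:i+L] in ENGLISH_WORDS)
-- ===== Notes on version B (the rewrite author's own statement) =====
-- stated objective: alternative
-- what changed: B replaces A's word-major loop (repeated str.find per dictionary word with an explicit while-loop accumulator) by a single position-major comprehension over text indices that probes only the distinct word lengths >= 3 and tests each slice by set membership.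
import Mathlib
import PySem

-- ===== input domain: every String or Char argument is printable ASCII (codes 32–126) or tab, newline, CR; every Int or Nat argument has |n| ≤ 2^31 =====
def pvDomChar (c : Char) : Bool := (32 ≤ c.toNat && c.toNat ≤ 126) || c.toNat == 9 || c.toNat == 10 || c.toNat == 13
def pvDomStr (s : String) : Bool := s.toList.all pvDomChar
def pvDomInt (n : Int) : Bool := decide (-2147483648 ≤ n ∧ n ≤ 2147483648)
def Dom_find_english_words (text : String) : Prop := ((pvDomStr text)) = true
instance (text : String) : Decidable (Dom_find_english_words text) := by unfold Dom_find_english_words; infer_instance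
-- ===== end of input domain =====

-- B replaces A's word-major str.find while-loops by one position-major comprehension probing
-- only the distinct dictionary word lengths; same return value, alternative algorithm.

-- the module-level ENGLISH_WORDS literal (module data shared by both ports, as in the Python module)
def pvWordList : List String := [
  "THE", "BE", "TO", "OF", "AND", "A", "IN", "THAT", "HAVE", "I",
  "IT", "FOR", "NOT", "ON", "WITH", "HE", "AS", "YOU", "DO", "AT",
  "THIS", "BUT", "HIS", "BY", "FROM", "THEY", "WE", "SAY", "HER", "SHE",
  "OR", "AN", "WILL", "MY", "ONE", "ALL", "WOULD", "THERE", "THEIR", "WHAT",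
  "SO", "UP", "OUT", "IF", "ABOUT", "WHO", "GET", "WHICH", "GO", "ME",
  "WHEN", "MAKE", "CAN", "LIKE", "TIME", "NO", "JUST", "HIM", "KNOW", "TAKE",
  "PEOPLE", "INTO", "YEAR", "YOUR", "GOOD", "SOME", "COULD", "THEM", "SEE", "OTHER",
  "THAN", "THEN", "NOW", "LOOK", "ONLY", "COME", "ITS", "OVER", "THINK", "ALSO",
  "BACK", "AFTER", "USE", "TWO", "HOW", "OUR", "WORK", "FIRST", "WELL", "WAY",
  "EVEN", "NEW", "WANT", "BECAUSE", "ANY", "THESE", "GIVE", "DAY", "MOST", "US",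
  "IS", "AM", "ARE", "WAS", "WERE", "BEEN", "BEING", "EACH", "FEW", "THOSE",
  "MUST", "SELF", "OWN", "SAME", "TELL", "NEED", "FEEL", "HIGH", "OLD", "GREAT",
  "NAME", "THING", "MAN", "WORLD", "LIFE", "HAND", "PART", "CHILD", "EYE", "WOMAN",
  "PLACE", "CASE", "WEEK", "POINT", "WORD", "FIND", "LONG", "LITTLE", "STILL", "MIGHT",
  "FACE", "LAST", "SIDE", "DOOR", "HOME", "NIGHT", "REAL", "HEAD", "TEAM", "BEST",
  "HOUR", "LINE", "LEFT", "ALONE", "LONE", "PATH", "TRUTH", "LIGHT", "DARK", "SOUL",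
  "MIND", "BODY", "HEART", "DEATH", "DEAD", "LIVE", "LEARN", "TEACH", "SHOW", "WALK",
  "RUN", "STAND", "SIT", "FALL", "RISE", "TURN", "MOVE", "WATCH", "WAIT", "SPEAK",
  "HEAR", "READ", "WRITE", "CALL", "LEAD", "HOLD", "KEEP", "BEGIN", "START", "EODE",
  "SEFA", "DEOR", "WEAN", "EORL", "WYRD", "FRITH", "DIVINITY", "PRIMES", "SACRED", "TOTIENT",
  "PILGRIM", "KOAN", "WISDOM"
]

def pvENGLISH_WORDS : PySem.Set String := PySem.Set.ofList pvWordList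

-- ===== PORT A =====

-- findFrom facts cited by pvFindLoop's decreasing_by (stated before the port so it can name them)
theorem pvAux (s sub : List Char) (st start : Int)
    (hne : ¬ PySem.Chars.find (List.drop st.toNat (List.take ((s.length:Int)).toNat s)) sub = -1)
    (h0 : 0 ≤ st) (h1 : start ≤ st) (hle : st ≤ (s.length:Int)) :
    start ≤ st + PySem.Chars.find (List.drop st.toNat (List.take ((s.length:Int)).toNat s)) sub ∧
    0 ≤ st + PySem.Chars.find (List.drop st.toNat (List.take ((s.length:Int)).toNat s)) sub ∧
    st + PySem.Chars.find (List.drop st.toNat (List.take ((s.length:Int)).toNat s)) sub ≤ (s.length:Int) := by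
  have hr1 := PySem.Chars.neg_one_le_find (List.drop st.toNat (List.take ((s.length:Int)).toNat s)) sub
  have hr2 := PySem.Chars.find_le_length (List.drop st.toNat (List.take ((s.length:Int)).toNat s)) sub
  simp only [List.length_drop, List.length_take] at hr2
  omega

theorem pvFindFrom_bound (s sub : List Char) (start : Int)
    (h : PySem.Chars.findFrom s sub start ≠ -1) :
    start ≤ PySem.Chars.findFrom s sub start ∧ 0 ≤ PySem.Chars.findFrom s sub start ∧
      PySem.Chars.findFrom s sub start ≤ (s.length : Int) := by
  unfold PySem.Chars.findFrom at h ⊢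
  simp only at h ⊢
  split_ifs at h ⊢ <;>
    first
      | (exact absurd rfl h)
      | (rename_i hne; exact pvAux s sub _ start hne (by omega) (by omega) (by omega))

-- the 'while True: idx = text.find(word, idx); …' loop of A, step for step
def pvFindLoop (text word : String) (idx : Int) (found : List (Int × String)) :
    List (Int × String) :=
  let j := PySem.Str.findFrom text word idx
  if h : j = -1 then found
  else pvFindLoop text word (j + 1) (found ++ [(j, word)])
termination_by text.toList.length + 1 - idx.toNat
decreasing_by
  have hb := pvFindFrom_bound text.toList word.toList idx (by simpa [j] using h)
  simp only [j, PySem.Str.findFrom_eq] at *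
  omega

def find_english_words (text : String) : List (Int × String) :=
  let found := List.foldl
    (fun found word =>
      if 3 ≤ PySem.Str.len word then pvFindLoop text word 0 found else found)
    [] pvENGLISH_WORDS
  PySem.List.sorted2 found (fun p => p.1) (fun p => p.2) false

-- ===== PORT B =====
-- Source B's module data: WORD_LINES and ENGLISH_WORDS = set(w for line in WORD_LINES for w in line.split())
def pvWordLines : List String := [
  "THE BE TO OF AND A IN THAT HAVE I IT FOR NOT ON WITH HE AS YOU DO AT",
  "THIS BUT HIS BY FROM THEY WE SAY HER SHE OR AN WILL MY ONE ALL WOULD THERE THEIR WHAT",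
  "SO UP OUT IF ABOUT WHO GET WHICH GO ME WHEN MAKE CAN LIKE TIME NO JUST HIM KNOW TAKE",
  "PEOPLE INTO YEAR YOUR GOOD SOME COULD THEM SEE OTHER THAN THEN NOW LOOK ONLY COME ITS OVER THINK ALSO",
  "BACK AFTER USE TWO HOW OUR WORK FIRST WELL WAY EVEN NEW WANT BECAUSE ANY THESE GIVE DAY MOST US",
  "IS AM ARE WAS WERE BEEN BEING EACH FEW THOSE MUST SELF OWN SAME TELL NEED FEEL HIGH OLD GREAT",
  "NAME THING MAN WORLD LIFE HAND PART CHILD EYE WOMAN PLACE CASE WEEK POINT WORD FIND LONG LITTLE STILL MIGHT",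
  "FACE LAST SIDE DOOR HOME NIGHT REAL HEAD TEAM BEST HOUR LINE LEFT ALONE LONE PATH TRUTH LIGHT DARK SOUL",
  "MIND BODY HEART DEATH DEAD LIVE LEARN TEACH SHOW WALK RUN STAND SIT FALL RISE TURN MOVE WATCH WAIT SPEAK",
  "HEAR READ WRITE CALL LEAD HOLD KEEP BEGIN START EODE SEFA DEOR WEAN EORL WYRD FRITH DIVINITY PRIMES SACRED TOTIENT",
  "PILGRIM KOAN WISDOM"]

def pvWordListB : List String := pvWordLines.flatMap (fun line => PySem.Str.split₀ line)

def pvENGLISH_WORDS_B : PySem.Set String := PySem.Set.ofList pvWordListB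

-- LENGTHS = sorted({len(w) for w in ENGLISH_WORDS if len(w) >= 3})
def pvLENGTHS : List Int :=
  PySem.List.sorted
    (PySem.Set.ofList
      ((pvENGLISH_WORDS_B.filter (fun w => 3 ≤ PySem.Str.len w)).map (fun w => PySem.Str.len w)))
    (fun x => x) false

-- the comprehension of Source B: flatMap over positions, filter on the probed lengths, then sorted
def find_english_words_alt (text : String) : List (Int × String) :=
  PySem.List.sorted2
    ((PySem.List.pyRange 0 (PySem.Str.len text) 1).flatMap (fun i =>
      (pvLENGTHS.filter (fun L =>
          PySem.Str.len (PySem.Str.slice text (some i) (some (i + L))) == L &&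
          PySem.Set.contains pvENGLISH_WORDS_B (PySem.Str.slice text (some i) (some (i + L))))).map
        (fun L => (i, PySem.Str.slice text (some i) (some (i + L))))))
    (fun p => p.1) (fun p => p.2) false

-- ===== PRECONDITION & SPEC =====
def Spec_find_english_words (text : String) (out : List (Int × String)) : Prop := out = find_english_words_alt text
instance (text : String) (out : List (Int × String)) : Decidable (Spec_find_english_words text out) := by unfold Spec_find_english_words; infer_instance

-- ===== CLAIM (what is proved, stated in full; the proofs are below) =====
def Claim_equal_find_english_words : Prop := ∀ (text : String), Dom_find_english_words text → Spec_find_english_words text (find_english_words text)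

-- ===== LEMMAS AND PROOFS =====

-- the canonical occurrence predicate both pre-sort lists are shown to realise
def pvOcc (text : String) (p : Int × String) : Prop :=
  ∃ w ∈ pvWordList, 3 ≤ w.toList.length ∧
    ∃ j : ℕ, p = ((j : Int), w) ∧ w.toList <+: text.toList.drop j

set_option maxRecDepth 40000 in
set_option maxHeartbeats 2000000 in
theorem pvWordListB_eq : pvWordListB = pvWordList := by rfl

theorem pvFindFrom_past (s sub : List Char) (start : Int) (h : (s.length : Int) < start) :
    PySem.Chars.findFrom s sub start = -1 := by
  unfold PySem.Chars.findFrom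
  simp only
  rw [if_neg (by omega : ¬ start < 0), if_pos h]

theorem pvFindLoop_eq (text word : String) (idx : Int) (found : List (Int × String)) :
    pvFindLoop text word idx found =
      if PySem.Chars.findFrom text.toList word.toList idx = -1 then found
      else pvFindLoop text word (PySem.Chars.findFrom text.toList word.toList idx + 1)
            (found ++ [(PySem.Chars.findFrom text.toList word.toList idx, word)]) := by
  conv_lhs => rw [pvFindLoop]
  simp [PySem.Str.findFrom_eq]

theorem pvFindLoop_acc (text word : String) :
    ∀ (k : ℕ) (idx : Int), text.toList.length + 1 - idx.toNat ≤ k →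
      ∀ found, pvFindLoop text word idx found = found ++ pvFindLoop text word idx [] := by
  intro k
  induction k with
  | zero =>
    intro idx hk found
    have hneg : PySem.Chars.findFrom text.toList word.toList idx = -1 :=
      pvFindFrom_past _ _ _ (by omega)
    conv_lhs => rw [pvFindLoop_eq, if_pos hneg]
    conv_rhs => rw [pvFindLoop_eq, if_pos hneg]
    simp
  | succ k ih =>
    intro idx hk found
    by_cases hj : PySem.Chars.findFrom text.toList word.toList idx = -1
    · conv_lhs => rw [pvFindLoop_eq, if_pos hj]
      conv_rhs => rw [pvFindLoop_eq, if_pos hj]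
      simp
    · have hb := pvFindFrom_bound text.toList word.toList idx hj
      have hm : text.toList.length + 1 - (PySem.Chars.findFrom text.toList word.toList idx + 1).toNat ≤ k := by
        omega
      conv_lhs => rw [pvFindLoop_eq, if_neg hj]
      conv_rhs => rw [pvFindLoop_eq, if_neg hj]
      rw [ih _ hm (found ++ [(PySem.Chars.findFrom text.toList word.toList idx, word)]),
        ih _ hm ([] ++ [(PySem.Chars.findFrom text.toList word.toList idx, word)])]
      simp

theorem pvFindLoop_append (text word : String) (idx : Int) (found : List (Int × String)) :
    pvFindLoop text word idx found = found ++ pvFindLoop text word idx [] :=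
  pvFindLoop_acc text word _ idx le_rfl found

theorem mem_pvFindLoop (text word : String) (hw : word.toList ≠ []) :
    ∀ (k : ℕ) (idx : Int), text.toList.length + 1 - idx.toNat ≤ k → 0 ≤ idx →
      ∀ p, p ∈ pvFindLoop text word idx [] ↔
        ∃ j : ℕ, idx ≤ (j : Int) ∧ p = ((j : Int), word) ∧ word.toList <+: text.toList.drop j := by
  have hwlen : word.toList.length ≠ 0 := by simpa using hw
  intro k
  induction k with
  | zero =>
    intro idx hk h0 p
    have hneg : PySem.Chars.findFrom text.toList word.toList idx = -1 :=
      pvFindFrom_past _ _ _ (by omega)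
    rw [pvFindLoop_eq, if_pos hneg]
    simp only [List.not_mem_nil, false_iff]
    rintro ⟨j, hj1, _, hj3⟩
    have hlen := hj3.length_le
    simp only [List.length_drop] at hlen
    omega
  | succ k ih =>
    intro idx hk h0 p
    by_cases hle : idx.toNat ≤ text.toList.length
    case neg =>
      have hneg : PySem.Chars.findFrom text.toList word.toList idx = -1 :=
        pvFindFrom_past _ _ _ (by omega)
      rw [pvFindLoop_eq, if_pos hneg]
      simp only [List.not_mem_nil, false_iff]
      rintro ⟨j, hj1, _, hj3⟩
      have hlen := hj3.length_le
      simp only [List.length_drop] at hlen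
      omega
    case pos =>
      have hcast : ((idx.toNat : Int)) = idx := Int.toNat_of_nonneg h0
      by_cases hj : PySem.Chars.findFrom text.toList word.toList idx = -1
      · rw [pvFindLoop_eq, if_pos hj]
        simp only [List.not_mem_nil, false_iff]
        have hni : ¬ word.toList <:+: (text.toList.drop idx.toNat) := by
          refine (PySem.Chars.findFrom_natCast_eq_neg_one_iff text.toList word.toList idx.toNat hle).1 ?_
          rw [hcast]; exact hj
        rintro ⟨j, hj1, _, hj3⟩
        apply hni
        have hdd : text.toList.drop j = (text.toList.drop idx.toNat).drop (j - idx.toNat) := by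
          rw [List.drop_drop]; congr 1; omega
        rw [hdd] at hj3
        rw [← PySem.Chars.isIn_iff_infix]
        exact (PySem.Chars.exists_prefix_drop_iff_isIn _ _).1 ⟨_, hj3⟩
      · have hb := pvFindFrom_bound text.toList word.toList idx hj
        have hspec := PySem.Chars.findFrom_natCast_spec text.toList word.toList idx.toNat hle
          (by rw [hcast]; exact hj)
        rw [hcast] at hspec
        obtain ⟨-, hpre, hmin⟩ := hspec
        rw [pvFindLoop_eq, if_neg hj, pvFindLoop_append]
        simp only [List.nil_append]
        rw [List.mem_append]
        rw [ih (PySem.Chars.findFrom text.toList word.toList idx + 1) (by omega) (by omega) p]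
        constructor
        · rintro (hp | ⟨j', hj1', hj2', hj3'⟩)
          · simp only [List.mem_singleton] at hp
            refine ⟨(PySem.Chars.findFrom text.toList word.toList idx).toNat, by omega, ?_, hpre⟩
            rw [hp]
            congr 1
            omega
          · exact ⟨j', by omega, hj2', hj3'⟩
        · rintro ⟨j', hj1', hj2', hj3'⟩
          rcases lt_trichotomy (j' : Int) (PySem.Chars.findFrom text.toList word.toList idx) with h | h | h
          · exact absurd hj3' (hmin j' (by omega) (by omega))
          · left
            simp only [List.mem_singleton]
            rw [hj2', ← h]
          · right
            exact ⟨j', by omega, hj2', hj3'⟩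

theorem pairwise_pvFindLoop (text word : String) :
    ∀ (k : ℕ) (idx : Int), text.toList.length + 1 - idx.toNat ≤ k →
      ∀ found, (∀ q ∈ found, q.1 < idx) → found.Pairwise (fun a b => a.1 < b.1) →
        (pvFindLoop text word idx found).Pairwise (fun a b => a.1 < b.1) := by
  intro k
  induction k with
  | zero =>
    intro idx hk found hlt hp
    have hneg : PySem.Chars.findFrom text.toList word.toList idx = -1 :=
      pvFindFrom_past _ _ _ (by omega)
    rw [pvFindLoop_eq, if_pos hneg]
    exact hp
  | succ k ih =>
    intro idx hk found hlt hp
    by_cases hj : PySem.Chars.findFrom text.toList word.toList idx = -1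
    · rw [pvFindLoop_eq, if_pos hj]; exact hp
    · have hb := pvFindFrom_bound text.toList word.toList idx hj
      rw [pvFindLoop_eq, if_neg hj]
      refine ih _ (by omega) _ ?_ ?_
      · intro q hq
        rcases List.mem_append.1 hq with hq | hq
        · have := hlt q hq; omega
        · simp only [List.mem_singleton] at hq
          rw [hq]; simp
      · rw [List.pairwise_append]
        refine ⟨hp, by simp, ?_⟩
        intro a ha b hb'
        simp only [List.mem_singleton] at hb'
        have := hlt a ha
        rw [hb']
        simp; omega

theorem snd_mem_pvFindLoop (text word : String) (hw : word.toList ≠ []) (p : Int × String)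
    (hp : p ∈ pvFindLoop text word 0 []) : p.2 = word := by
  rcases (mem_pvFindLoop text word hw _ 0 le_rfl (by omega) p).1 hp with ⟨j, -, hp2, -⟩
  rw [hp2]

-- A's pre-sort accumulator as a flatMap
def pvChunkA (text word : String) : List (Int × String) :=
  if 3 ≤ PySem.Str.len word then pvFindLoop text word 0 [] else []

theorem foundA_eq (text : String) : ∀ (ws : List String) (acc : List (Int × String)),
    List.foldl (fun found word =>
      if 3 ≤ PySem.Str.len word then pvFindLoop text word 0 found else found) acc ws
      = acc ++ ws.flatMap (pvChunkA text) := by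
  intro ws
  induction ws with
  | nil => intro acc; simp
  | cons w ws ih =>
    intro acc
    rw [List.foldl_cons, List.flatMap_cons, ih]
    unfold pvChunkA
    by_cases hw : 3 ≤ PySem.Str.len w
    · rw [if_pos hw, if_pos hw, pvFindLoop_append]
      simp
    · rw [if_neg hw, if_neg hw]
      simp

-- B's pre-sort list, one position at a time
def pvSubB (text : String) (i L : Int) : String := PySem.Str.slice text (some i) (some (i + L))

def pvCondB (text : String) (i : Int) (L : Int) : Bool :=
  PySem.Str.len (pvSubB text i L) == L && PySem.Set.contains pvENGLISH_WORDS_B (pvSubB text i L)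

def pvChunkB (text : String) (i : Int) : List (Int × String) :=
  (pvLENGTHS.filter (pvCondB text i)).map (fun L => (i, pvSubB text i L))

theorem foundB_eq (text : String) :
    ((PySem.List.pyRange 0 (PySem.Str.len text) 1).flatMap (fun i =>
      (pvLENGTHS.filter (fun L =>
          PySem.Str.len (PySem.Str.slice text (some i) (some (i + L))) == L &&
          PySem.Set.contains pvENGLISH_WORDS_B (PySem.Str.slice text (some i) (some (i + L))))).map
        (fun L => (i, PySem.Str.slice text (some i) (some (i + L))))))
      = (PySem.List.pyRange 0 (PySem.Str.len text) 1).flatMap (pvChunkB text) := rfl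

theorem mem_pvLENGTHS (L : Int) :
    L ∈ pvLENGTHS ↔ ∃ w ∈ pvWordList, 3 ≤ w.toList.length ∧ L = (w.toList.length : Int) := by
  unfold pvLENGTHS pvENGLISH_WORDS_B
  rw [PySem.List.mem_sorted, PySem.Set.mem_ofList, pvWordListB_eq]
  simp only [List.mem_map, List.mem_filter, PySem.Set.mem_ofList, PySem.Str.len]
  constructor
  · rintro ⟨w, ⟨hw1, hw2⟩, hw3⟩
    exact ⟨w, hw1, by simpa using hw2, by simpa using hw3.symm⟩
  · rintro ⟨w, hw1, hw2, hw3⟩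
    exact ⟨w, ⟨hw1, by simpa using hw2⟩, by simpa using hw3.symm⟩

theorem nodup_pvLENGTHS : pvLENGTHS.Nodup := by
  unfold pvLENGTHS
  exact (PySem.List.sorted_perm _ _ _).symm.nodup (PySem.Set.nodup_ofList _)

theorem pvStrLen_cast (w : String) : PySem.Str.len w = (w.toList.length : Int) := by
  simp [PySem.Str.len]

theorem snd_mem_pvChunkA (text w : String) (q : Int × String) (hq : q ∈ pvChunkA text w) :
    q.2 = w := by
  unfold pvChunkA at hq
  split at hq
  · rename_i h3
    refine snd_mem_pvFindLoop text w ?_ q hq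
    rw [pvStrLen_cast] at h3
    intro hnil
    rw [hnil] at h3
    simp at h3
  · simp at hq

theorem mem_foundA (text : String) (p : Int × String) :
    p ∈ pvENGLISH_WORDS.flatMap (pvChunkA text) ↔ pvOcc text p := by
  rw [List.mem_flatMap]
  unfold pvOcc
  constructor
  · rintro ⟨w, hw, hp⟩
    unfold pvENGLISH_WORDS at hw
    rw [PySem.Set.mem_ofList] at hw
    unfold pvChunkA at hp
    split at hp
    · rename_i h3
      rw [pvStrLen_cast] at h3
      have h3' : 3 ≤ w.toList.length := by exact_mod_cast h3
      have hw0 : w.toList ≠ [] := by intro hnil; rw [hnil] at h3'; simp at h3'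
      obtain ⟨j, -, hp2, hp3⟩ := (mem_pvFindLoop text w hw0 _ 0 le_rfl le_rfl p).1 hp
      exact ⟨w, hw, h3', j, hp2, hp3⟩
    · simp at hp
  · rintro ⟨w, hw, h3, j, hp2, hp3⟩
    refine ⟨w, by unfold pvENGLISH_WORDS; exact (PySem.Set.mem_ofList _ _).2 hw, ?_⟩
    unfold pvChunkA
    have hw0 : w.toList ≠ [] := by intro hnil; rw [hnil] at h3; simp at h3
    rw [if_pos (by rw [pvStrLen_cast]; exact_mod_cast h3)]
    exact (mem_pvFindLoop text w hw0 _ 0 le_rfl le_rfl p).2 ⟨j, by omega, hp2, hp3⟩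

theorem mem_foundB (text : String) (p : Int × String) :
    p ∈ (PySem.List.pyRange 0 (PySem.Str.len text) 1).flatMap (pvChunkB text) ↔ pvOcc text p := by
  rw [List.mem_flatMap]
  unfold pvOcc
  constructor
  · rintro ⟨i, hi, hp⟩
    rw [PySem.List.mem_pyRange_one] at hi
    unfold pvChunkB at hp
    rw [List.mem_map] at hp
    obtain ⟨L, hL, hpe⟩ := hp
    rw [List.mem_filter] at hL
    obtain ⟨hLmem, hcond⟩ := hL
    unfold pvCondB at hcond
    rw [Bool.and_eq_true, beq_iff_eq] at hcond
    obtain ⟨hlen, hmem⟩ := hcond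
    have hmem' : pvSubB text i L ∈ pvWordList := by
      have hm2 := (PySem.Set.contains_iff _ _).1 hmem
      unfold pvENGLISH_WORDS_B at hm2
      rw [PySem.Set.mem_ofList, pvWordListB_eq] at hm2
      exact hm2
    obtain ⟨w', hw'1, hw'2, hw'3⟩ := (mem_pvLENGTHS L).1 hLmem
    obtain ⟨m, rfl⟩ : ∃ m : ℕ, i = (m : Int) := ⟨i.toNat, (Int.toNat_of_nonneg hi.1).symm⟩
    have hsub : (pvSubB text (m : Int) L).toList = (text.toList.drop m).take w'.toList.length := by
      unfold pvSubB
      rw [PySem.Str.toList_slice, PySem.Chars.slice_eq_listSlice, hw'3,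
        PySem.List.slice_natCast_add]
    rw [pvStrLen_cast] at hlen
    have hlw : (pvSubB text (m : Int) L).toList.length = w'.toList.length := by omega
    refine ⟨pvSubB text (m : Int) L, hmem', by omega, m, hpe.symm, ?_⟩
    rw [hsub]
    exact List.take_prefix _ _
  · rintro ⟨w, hw, h3, j, hp2, hp3⟩
    have hwlen : w.toList.length ≤ text.toList.length - j := by
      simpa [List.length_drop] using hp3.length_le
    have hjlt : j < text.toList.length := by omega
    have hsub : (pvSubB text (j : Int) (w.toList.length : Int)).toList = w.toList := by
      unfold pvSubB
      rw [PySem.Str.toList_slice, PySem.Chars.slice_eq_listSlice, PySem.List.slice_natCast_add]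
      exact (List.prefix_iff_eq_take.1 hp3).symm
    have hsubeq : pvSubB text (j : Int) (w.toList.length : Int) = w :=
      String.toList_inj.1 hsub
    refine ⟨(j : Int), ?_, ?_⟩
    · rw [PySem.List.mem_pyRange_one, pvStrLen_cast]
      exact ⟨by omega, by exact_mod_cast hjlt⟩
    · unfold pvChunkB
      rw [List.mem_map]
      refine ⟨(w.toList.length : Int), ?_, ?_⟩
      · rw [List.mem_filter]
        refine ⟨(mem_pvLENGTHS _).2 ⟨w, hw, h3, rfl⟩, ?_⟩
        unfold pvCondB
        rw [Bool.and_eq_true, beq_iff_eq]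
        constructor
        · rw [hsubeq, pvStrLen_cast]
        · rw [hsubeq]
          exact (PySem.Set.contains_iff _ _).2
            (by unfold pvENGLISH_WORDS_B; rw [PySem.Set.mem_ofList, pvWordListB_eq]; exact hw)
      · rw [hsubeq, hp2]

theorem nodup_foundA (text : String) : (pvENGLISH_WORDS.flatMap (pvChunkA text)).Nodup := by
  rw [List.nodup_flatMap]
  constructor
  · intro w _
    unfold pvChunkA
    split
    · refine List.Pairwise.imp ?_
        (pairwise_pvFindLoop text w _ 0 le_rfl [] (by simp) (by simp))
      intro a b hlt heq
      rw [heq] at hlt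
      exact lt_irrefl _ hlt
    · exact List.nodup_nil
  · refine (PySem.Set.nodup_ofList pvWordList).imp ?_
    intro w1 w2 hne
    unfold Function.onFun
    rw [List.disjoint_left]
    intro q hq1 hq2
    exact hne ((snd_mem_pvChunkA text w1 q hq1) ▸ (snd_mem_pvChunkA text w2 q hq2) ▸ rfl)

theorem nodup_foundB (text : String) :
    ((PySem.List.pyRange 0 (PySem.Str.len text) 1).flatMap (pvChunkB text)).Nodup := by
  rw [List.nodup_flatMap]
  constructor
  · intro i _
    unfold pvChunkB
    refine List.Nodup.map_on ?_ (nodup_pvLENGTHS.filter _)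
    intro L1 h1 L2 h2 heq
    rw [List.mem_filter] at h1 h2
    have c1 := h1.2
    have c2 := h2.2
    unfold pvCondB at c1 c2
    rw [Bool.and_eq_true, beq_iff_eq] at c1 c2
    have hsub : pvSubB text i L1 = pvSubB text i L2 := congrArg Prod.snd heq
    rw [← c1.1, ← c2.1, hsub]
  · have hnd : (PySem.List.pyRange 0 (PySem.Str.len text) 1).Nodup := by
      rw [PySem.List.pyRange_one]
      exact (List.nodup_range).map (fun a b hab => by omega)
    refine hnd.imp ?_
    intro i1 i2 hne
    unfold Function.onFun
    rw [List.disjoint_left]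
    intro q hq1 hq2
    unfold pvChunkB at hq1 hq2
    rw [List.mem_map] at hq1 hq2
    obtain ⟨L1, -, hL1⟩ := hq1
    obtain ⟨L2, -, hL2⟩ := hq2
    apply hne
    have e1 : q.1 = i1 := by rw [← hL1]
    have e2 : q.1 = i2 := by rw [← hL2]
    rw [← e1, e2]

-- Python tuple sorting: sorted2 on the two projections is sorting by the lexicographic key
theorem sorted2_eq_sorted_toLex (xs : List (Int × String)) :
    PySem.List.sorted2 xs (fun p => p.1) (fun p => p.2) false
      = PySem.List.sorted xs (fun p => toLex (p.1, p.2)) false := by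
  have hbefore : (fun (a b : Int × String) => decide (a.1 < b.1) || !decide (b.1 < a.1) && decide (a.2 < b.2))
      = (fun (a b : Int × String) => decide (toLex (a.1, a.2) < toLex (b.1, b.2))) := by
    funext a b
    rw [Bool.eq_iff_iff]
    simp only [Bool.or_eq_true, Bool.and_eq_true, Bool.not_eq_eq_eq_not, Bool.not_true,
      decide_eq_true_eq, decide_eq_false_iff_not, Prod.Lex.lt_iff]
    constructor
    · rintro (h | ⟨h1, h2⟩)
      · exact Or.inl h
      · by_cases h0 : a.1 < b.1
        · exact Or.inl h0
        · exact Or.inr ⟨by simp; omega, by simpa using h2⟩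
    · rintro (h | ⟨h1, h2⟩)
      · exact Or.inl h
      · refine Or.inr ⟨by simp at h1 ⊢; omega, by simpa using h2⟩
  unfold PySem.List.sorted2 PySem.List.sorted
  simp only [if_neg (by simp : ¬ (false = true))]
  rw [hbefore]

-- ===== VERDICT (by name: the statement is the Claim_ definition above) =====
theorem find_english_words_spec : Claim_equal_find_english_words := by
  intro text _
  unfold Spec_find_english_words find_english_words find_english_words_alt
  rw [foundA_eq, foundB_eq]
  have hA := nodup_foundA text
  have hB := nodup_foundB text
  have hperm : (pvENGLISH_WORDS.flatMap (pvChunkA text)).Perm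
      ((PySem.List.pyRange 0 (PySem.Str.len text) 1).flatMap (pvChunkB text)) :=
    (List.perm_ext_iff_of_nodup hA hB).2 (fun a => (mem_foundA text a).trans (mem_foundB text a).symm)
  rw [List.nil_append, sorted2_eq_sorted_toLex, sorted2_eq_sorted_toLex]
  exact PySem.List.sorted_eq_sorted_of_perm _ _ _ (fun a b hab => by
    have := congrArg ofLex hab
    simpa [Prod.ext_iff] using this) hperm
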